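-- pv_equiv track=rewrite | github.com/minimario47/Sparplanen | TrainData/legacy/make_track_arrival_departure_csv_v4.py | resolve_companion_duplicate_pairs
-- ===== SOURCE A (Python) =====
-- from collections import defaultdict
-- from typing import Dict, Iterable, List, Tuple
--
-- def resolve_companion_duplicate_pairs(rows: List[dict]) -> List[dict]:
--     """Resolve a recurring visual pattern from the PDF:
--
--     Two parallel rows can share the same numeric pair, where one true pair row is accompanied by
--     a shorter companion row with the same numbers plus a non-numeric note like U/D. In the raw
--     token stream this often appears as AAB or ABB. When a clean AB companion exists on the same
--     page/track for the same arrival/departure numbers, reinterpret: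
--       - AAB companion as arrival-only
--       - ABB companion as departure-only
--     """
--     out = [dict(r) for r in rows]
--     groups = defaultdict(list)
--     for i, r in enumerate(out):
--         if r.get('arrival_train') and r.get('departure_train'):
--             key = (r.get('day',''), r.get('page',''), r.get('track',''), r.get('arrival_train',''), r.get('departure_train',''))
--             groups[key].append(i)
--
--     for key, idxs in groups.items():
--         if len(idxs) < 2:
--             continue
--         has_ab = any(out[i].get('token_pattern') == 'AB' for i in idxs)
--         if not has_ab:
--             continue
--         for i in idxs:
--             pat = out[i].get('token_pattern','')
--             if pat == 'AAB':
--                 out[i]['departure_train'] = ''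
--                 out[i]['departure_time'] = ''
--                 out[i]['departure_number_of_vehicles'] = ''
--                 out[i]['confidence'] = 'reviewed'
--                 out[i]['inference_type'] = 'companion_duplicate_AAB_resolved_to_arrival_only'
--             elif pat == 'ABB':
--                 out[i]['arrival_train'] = ''
--                 out[i]['arrival_time'] = ''
--                 out[i]['arrival_number_of_vehicles'] = ''
--                 out[i]['confidence'] = 'reviewed'
--                 out[i]['inference_type'] = 'companion_duplicate_ABB_resolved_to_departure_only'
--     return out
-- ===== SOURCE B (Python) =====
-- def resolve_companion_duplicate_pairs(rows):
--     """One pass builds a key -> [count, has_AB] summary table; a second flat pass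
--     over the row copies applies the AAB/ABB rewrite wherever the table qualifies."""
--     out = [dict(r) for r in rows]
--     stats = {}
--     for r in out:
--         if r.get('arrival_train') and r.get('departure_train'):
--             key = (r.get('day',''), r.get('page',''), r.get('track',''), r.get('arrival_train',''), r.get('departure_train',''))
--             cnt, has_ab = stats.get(key, (0, False))
--             stats[key] = (cnt + 1, has_ab or r.get('token_pattern') == 'AB')
--     for r in out:
--         if not (r.get('arrival_train') and r.get('departure_train')):
--             continue
--         key = (r.get('day',''), r.get('page',''), r.get('track',''), r.get('arrival_train',''), r.get('departure_train',''))
--         cnt, has_ab = stats[key]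
--         if cnt < 2 or not has_ab:
--             continue
--         pat = r.get('token_pattern', '')
--         if pat == 'AAB':
--             r['departure_train'] = ''
--             r['departure_time'] = ''
--             r['departure_number_of_vehicles'] = ''
--             r['confidence'] = 'reviewed'
--             r['inference_type'] = 'companion_duplicate_AAB_resolved_to_arrival_only'
--         elif pat == 'ABB':
--             r['arrival_train'] = ''
--             r['arrival_time'] = ''
--             r['arrival_number_of_vehicles'] = ''
--             r['confidence'] = 'reviewed'
--             r['inference_type'] = 'companion_duplicate_ABB_resolved_to_departure_only'
--     return out
-- ===== Notes on version B (the rewrite author's own statement) =====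
-- stated objective: simpler
-- what changed: Replaces the key->index-list grouping dict and the nested per-group index loop with a key->(count,has_AB) summary table built in one pass, followed by a single flat pass over the row copies that rewrites each qualifying row in place.
import Mathlib
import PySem

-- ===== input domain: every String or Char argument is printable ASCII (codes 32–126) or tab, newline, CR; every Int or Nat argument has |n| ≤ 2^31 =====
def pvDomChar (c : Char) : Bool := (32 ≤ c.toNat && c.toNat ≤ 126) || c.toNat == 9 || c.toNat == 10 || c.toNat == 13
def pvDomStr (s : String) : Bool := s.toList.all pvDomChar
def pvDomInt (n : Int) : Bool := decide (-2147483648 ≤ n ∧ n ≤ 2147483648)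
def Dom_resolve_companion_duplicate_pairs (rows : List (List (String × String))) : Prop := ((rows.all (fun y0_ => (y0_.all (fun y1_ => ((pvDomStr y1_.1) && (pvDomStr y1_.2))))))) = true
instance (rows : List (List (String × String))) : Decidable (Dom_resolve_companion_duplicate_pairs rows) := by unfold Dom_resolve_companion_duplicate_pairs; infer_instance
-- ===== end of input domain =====

-- B replaces A's key→index-list grouping dict plus nested per-group index loop by a
-- key→(count, has_AB) summary table and one flat rewrite pass over the row copies (objective: simpler).

-- ===== PORT A =====
abbrev pvRow : Type := PySem.Dict String String
abbrev pvKeyT : Type := String × String × String × String × String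

def pvGet (d : pvRow) (k : String) : String := d.getD k ""

def pvGuard (d : pvRow) : Bool := (pvGet d "arrival_train" != "") && (pvGet d "departure_train" != "")

def pvKey (d : pvRow) : pvKeyT :=
  (pvGet d "day", pvGet d "page", pvGet d "track", pvGet d "arrival_train", pvGet d "departure_train")

-- enumerate(out) with Nat indices (the Python indices are all ≥ 0)
def pvEnum : List pvRow → Nat → List (Nat × pvRow)
  | [], _ => []
  | r :: rs, i => (i, r) :: pvEnum rs (i + 1)

def pvRewAAB (d : pvRow) : pvRow :=
  ((((d.insert "departure_train" "").insert "departure_time" "").insert "departure_number_of_vehicles" "").insert "confidence" "reviewed").insert "inference_type" "companion_duplicate_AAB_resolved_to_arrival_only"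

def pvRewABB (d : pvRow) : pvRow :=
  ((((d.insert "arrival_train" "").insert "arrival_time" "").insert "arrival_number_of_vehicles" "").insert "confidence" "reviewed").insert "inference_type" "companion_duplicate_ABB_resolved_to_departure_only"

-- body of A's inner `for i in idxs:` loop
def pvStepA (out : List pvRow) (i : Nat) : List pvRow :=
  let pat := (out.getD i PySem.Dict.empty).getD "token_pattern" ""
  if pat == "AAB" then out.modify i pvRewAAB
  else if pat == "ABB" then out.modify i pvRewABB
  else out

-- body of A's `for key, idxs in groups.items():` loop
def pvGroupStep (out : List pvRow) (kv : pvKeyT × List Nat) : List pvRow :=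
  if kv.2.length < 2 then out
  else if !(kv.2.any (fun i => ((out.getD i PySem.Dict.empty).get? "token_pattern") == some "AB")) then out
  else kv.2.foldl pvStepA out

def resolve_companion_duplicate_pairs (rows : List (List (String × String))) : List (List (String × String)) :=
  let out := rows.map PySem.Dict.ofList
  let groups := (pvEnum out 0).foldl
      (fun g p => if pvGuard p.2 then g.modify (pvKey p.2) [] (fun v => v ++ [p.1]) else g)
      PySem.Dict.empty
  (groups.items.foldl pvGroupStep out).map (·.items)

-- ===== PORT B =====
-- the AAB/ABB rewrite of one row (shared literal field assignments)
def pvTouch (d : pvRow) : pvRow :=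
  let pat := d.getD "token_pattern" ""
  if pat == "AAB" then pvRewAAB d
  else if pat == "ABB" then pvRewABB d
  else d

-- body of B's summary-table pass
def pvStatStep (s : PySem.Dict pvKeyT (Nat × Bool)) (d : pvRow) : PySem.Dict pvKeyT (Nat × Bool) :=
  if pvGuard d then
    let p := s.getD (pvKey d) (0, false)
    s.insert (pvKey d) (p.1 + 1, p.2 || (d.get? "token_pattern" == some "AB"))
  else s

def resolve_companion_duplicate_pairs_alt (rows : List (List (String × String))) : List (List (String × String)) :=
  let out := rows.map PySem.Dict.ofList
  let stats := out.foldl pvStatStep PySem.Dict.empty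
  (out.map (fun d =>
    if pvGuard d then
      let p := stats.getD (pvKey d) (0, false)
      if decide (2 ≤ p.1) && p.2 then pvTouch d else d
    else d)).map (·.items)

-- ===== PRECONDITION & SPEC =====
def Spec_resolve_companion_duplicate_pairs (rows : List (List (String × String))) (out : List (List (String × String))) : Prop := out = resolve_companion_duplicate_pairs_alt rows
instance (rows : List (List (String × String))) (out : List (List (String × String))) : Decidable (Spec_resolve_companion_duplicate_pairs rows out) := by unfold Spec_resolve_companion_duplicate_pairs; infer_instance

-- ===== CLAIM (what is proved, stated in full; the proofs are below) =====
def Claim_equal_resolve_companion_duplicate_pairs : Prop := ∀ (rows : List (List (String × String))), Dom_resolve_companion_duplicate_pairs rows → Spec_resolve_companion_duplicate_pairs rows (resolve_companion_duplicate_pairs rows)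

-- ===== LEMMAS AND PROOFS =====

-- the guarded rows of ds whose 5-tuple key is K
def pvGrp (ds : List pvRow) (K : pvKeyT) : List pvRow :=
  ds.filter (fun d => pvGuard d && (pvKey d == K))

-- the indices of those rows
def pvIdxs (ds : List pvRow) (K : pvKeyT) : List Nat :=
  ((pvEnum ds 0).filter (fun p => pvGuard p.2 && (pvKey p.2 == K))).map (·.1)

-- group K qualifies: at least two members, one of which has token_pattern 'AB'
def pvQual (ds : List pvRow) (K : pvKeyT) : Bool :=
  decide (2 ≤ (pvGrp ds K).length) && (pvGrp ds K).any (fun d => d.get? "token_pattern" == some "AB")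

-- the value of one slot of A's out list after the groups with keys in S have been processed
def pvG (ds : List pvRow) (S : List pvKeyT) (d : pvRow) : pvRow :=
  if pvGuard d && decide (pvKey d ∈ S) && pvQual ds (pvKey d) then pvTouch d else d

-- A's grouping dict
def pvGroups (ds : List pvRow) : PySem.Dict pvKeyT (List Nat) :=
  (pvEnum ds 0).foldl
    (fun g p => if pvGuard p.2 then g.modify (pvKey p.2) [] (fun v => v ++ [p.1]) else g)
    PySem.Dict.empty

-- ---- pvEnum basics ----

theorem pvEnum_mem (ds : List pvRow) (s : Nat) (p : Nat × pvRow) :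
    p ∈ pvEnum ds s ↔ ∃ k, ∃ _ : k < ds.length, p.1 = s + k ∧ p.2 = ds[k] := by
  induction ds generalizing s with
  | nil => simp [pvEnum]
  | cons r rs ih =>
    simp only [pvEnum, List.mem_cons, ih]
    constructor
    · rintro (rfl | ⟨k, hk, h1, h2⟩)
      · exact ⟨0, by simp, by simp, by simp⟩
      · exact ⟨k + 1, by simpa using hk, by omega, by simpa using h2⟩
    · rintro ⟨k, hk, h1, h2⟩
      cases k with
      | zero =>
        left
        simp at h2
        obtain ⟨a, b⟩ := p
        simp at h1 h2 ⊢
        exact ⟨by omega, h2⟩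
      | succ k =>
        right
        exact ⟨k, by simpa using hk, by omega, by simpa using h2⟩

theorem pvEnum_pairwise (ds : List pvRow) (s : Nat) :
    (pvEnum ds s).Pairwise (fun p q => p.1 < q.1) := by
  induction ds generalizing s with
  | nil => simp [pvEnum]
  | cons r rs ih =>
    simp only [pvEnum, List.pairwise_cons]
    refine ⟨fun q hq => ?_, ih (s + 1)⟩
    obtain ⟨k, hk, h1, -⟩ := (pvEnum_mem rs (s + 1) q).1 hq
    omega

theorem pvEnum_getD (ds : List pvRow) (p : Nat × pvRow) (hp : p ∈ pvEnum ds 0) :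
    p.1 < ds.length ∧ ds.getD p.1 PySem.Dict.empty = p.2 := by
  obtain ⟨k, hk, h1, h2⟩ := (pvEnum_mem ds 0 p).1 hp
  have hk' : p.1 < ds.length := by omega
  refine ⟨hk', ?_⟩
  rw [List.getD_eq_getElem?_getD, List.getElem?_eq_getElem hk']
  simp only [Option.getD_some]
  have : p.1 = k := by omega
  subst this
  exact h2.symm

theorem pvEnum_filter_map_snd (ds : List pvRow) (Q : pvRow → Bool) (s : Nat) :
    ((pvEnum ds s).filter (fun p => Q p.2)).map (·.2) = ds.filter Q := by
  induction ds generalizing s with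
  | nil => simp [pvEnum]
  | cons r rs ih =>
    simp only [pvEnum, List.filter_cons]
    by_cases hq : Q r
    · simp [hq, ih]
    · simp [hq, ih]

theorem pvIdxs_length (ds : List pvRow) (K : pvKeyT) :
    (pvIdxs ds K).length = (pvGrp ds K).length := by
  have h := pvEnum_filter_map_snd ds (fun d => pvGuard d && (pvKey d == K)) 0
  unfold pvIdxs pvGrp
  rw [List.length_map, ← h, List.length_map]

theorem pvIdxs_map_getD (ds : List pvRow) (K : pvKeyT) :
    (pvIdxs ds K).map (fun i => ds.getD i PySem.Dict.empty) = pvGrp ds K := by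
  unfold pvIdxs
  rw [List.map_map]
  have h1 : ∀ p ∈ (pvEnum ds 0).filter (fun p => pvGuard p.2 && (pvKey p.2 == K)),
      ((fun i => ds.getD i PySem.Dict.empty) ∘ (·.1)) p = p.2 := by
    intro p hp
    exact (pvEnum_getD ds p (List.mem_of_mem_filter hp)).2
  rw [List.map_congr_left h1]
  exact pvEnum_filter_map_snd ds (fun d => pvGuard d && (pvKey d == K)) 0

theorem pvIdxs_any (ds : List pvRow) (K : pvKeyT) (P : pvRow → Bool) :
    (pvIdxs ds K).any (fun i => P (ds.getD i PySem.Dict.empty)) = (pvGrp ds K).any P := by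
  rw [← pvIdxs_map_getD ds K, List.any_map]
  rfl

theorem pvIdxs_mem (ds : List pvRow) (K : pvKeyT) (i : Nat) :
    i ∈ pvIdxs ds K ↔ i < ds.length ∧
      (pvGuard (ds.getD i PySem.Dict.empty) && (pvKey (ds.getD i PySem.Dict.empty) == K)) = true := by
  unfold pvIdxs
  constructor
  · intro hi
    obtain ⟨p, hp, rfl⟩ := List.mem_map.1 hi
    have hf := List.of_mem_filter hp
    have hmem := List.mem_of_mem_filter hp
    obtain ⟨hlt, hD⟩ := pvEnum_getD ds p hmem
    exact ⟨hlt, by rw [hD]; exact hf⟩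
  · rintro ⟨hlt, hP⟩
    have hp : (i, ds[i]) ∈ pvEnum ds 0 := by
      rw [pvEnum_mem]
      exact ⟨i, hlt, by omega, rfl⟩
    have hD : ds.getD i PySem.Dict.empty = ds[i] := by
      rw [List.getD_eq_getElem?_getD, List.getElem?_eq_getElem hlt]; rfl
    rw [hD] at hP
    exact List.mem_map.2 ⟨(i, ds[i]), List.mem_filter.2 ⟨hp, hP⟩, rfl⟩

theorem pvIdxs_nodup (ds : List pvRow) (K : pvKeyT) : (pvIdxs ds K).Nodup := by
  unfold pvIdxs
  have h : ((pvEnum ds 0).filter (fun p => pvGuard p.2 && (pvKey p.2 == K))).Pairwise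
      (fun p q => p.1 < q.1) := List.Pairwise.filter _ (pvEnum_pairwise ds 0)
  have h2 : (((pvEnum ds 0).filter (fun p => pvGuard p.2 && (pvKey p.2 == K))).map (·.1)).Pairwise
      (· < ·) := List.pairwise_map.2 h
  exact h2.imp (fun hab => Nat.ne_of_lt hab)

-- ---- A's grouping dict ----

theorem pvFoldGuard (l : List (Nat × pvRow)) (g : PySem.Dict pvKeyT (List Nat)) :
    l.foldl (fun g p => if pvGuard p.2 then g.modify (pvKey p.2) [] (fun v => v ++ [p.1]) else g) g
    = ((l.filter (fun p => pvGuard p.2)).map (fun p => (pvKey p.2, p.1))).foldl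
        (fun g q => g.modify q.1 [] (fun v => v ++ [q.2])) g := by
  induction l generalizing g with
  | nil => simp
  | cons p l ih =>
    simp only [List.foldl_cons, List.filter_cons]
    by_cases hg : pvGuard p.2
    · simp only [hg, if_true, List.map_cons, List.foldl_cons]
      exact ih _
    · simp only [hg, Bool.false_eq_true, if_false]
      exact ih g

theorem pvGroups_getD (ds : List pvRow) (K : pvKeyT) :
    (pvGroups ds).getD K [] = pvIdxs ds K := by
  unfold pvGroups
  rw [pvFoldGuard, PySem.Dict.getD_foldl_modify_append, PySem.Dict.getD_empty]
  simp only [List.nil_append, List.filter_map, List.map_map]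
  rw [List.filter_filter]
  unfold pvIdxs
  congr 1
  apply List.filter_congr
  intro p _
  simp only [Function.comp]
  rw [Bool.and_comm]

theorem pvGroups_keys_nodup (ds : List pvRow) : (pvGroups ds).keys.Nodup := by
  unfold pvGroups
  rw [pvFoldGuard]
  apply PySem.Dict.nodup_keys_foldl_modify_key
  rw [PySem.Dict.keys_empty]
  exact List.nodup_nil

theorem pvGroups_keys_mem (ds : List pvRow) (d : pvRow) (hd : d ∈ ds) (hg : pvGuard d = true) :
    pvKey d ∈ (pvGroups ds).keys := by
  unfold pvGroups
  rw [pvFoldGuard, PySem.Dict.keys_foldl_modify_key]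
  rw [PySem.Dict.keys_empty]
  rw [show ∀ xs : List pvKeyT, PySem.Set.update [] xs = PySem.Set.ofList xs from fun _ => rfl]
  rw [PySem.Set.mem_ofList, List.map_map]
  obtain ⟨k, hk, hdk⟩ := List.mem_iff_getElem.1 hd
  have hp : (k, ds[k]) ∈ pvEnum ds 0 := (pvEnum_mem ds 0 _).2 ⟨k, hk, by omega, rfl⟩
  refine List.mem_map.2 ⟨(k, ds[k]), List.mem_filter.2 ⟨hp, by simpa [hdk]⟩, ?_⟩
  simp [hdk]

-- ---- B's stats dict ----

theorem pvStats_getD (l : List pvRow) (s : PySem.Dict pvKeyT (Nat × Bool)) (K : pvKeyT) :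
    (l.foldl pvStatStep s).getD K (0, false)
    = ((s.getD K (0, false)).1 + (pvGrp l K).length,
       (s.getD K (0, false)).2 || (pvGrp l K).any (fun d => d.get? "token_pattern" == some "AB")) := by
  induction l generalizing s with
  | nil => simp [pvGrp]
  | cons d l ih =>
    simp only [List.foldl_cons]
    unfold pvGrp
    simp only [List.filter_cons]
    by_cases hg : pvGuard d
    · have hstep : pvStatStep s d = s.insert (pvKey d)
          ((s.getD (pvKey d) (0, false)).1 + 1,
           (s.getD (pvKey d) (0, false)).2 || (d.get? "token_pattern" == some "AB")) := by
        simp [pvStatStep, hg]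
      by_cases hk : pvKey d = K
      · have hb : (pvGuard d && (pvKey d == K)) = true := by simp [hg, hk]
        rw [hb, if_pos rfl, hstep, ih, PySem.Dict.getD_insert, if_pos hk.symm]
        subst hk
        apply Prod.ext
        · simp only [pvGrp, List.length_cons]
          omega
        · simp only [pvGrp, List.any_cons]
          rw [Bool.or_assoc]
      · have hb : (pvGuard d && (pvKey d == K)) = false := by simp [hk]
        rw [hb, if_neg (by simp), hstep, ih, PySem.Dict.getD_insert,
          if_neg (fun h => hk h.symm)]
        rfl
    · have hb : (pvGuard d && (pvKey d == K)) = false := by simp [hg]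
      have hstep : pvStatStep s d = s := by simp [pvStatStep, hg]
      rw [hb, if_neg (by simp), hstep, ih]
      rfl

-- ---- list getD helpers ------ ---- list getD helpers ----

theorem pvGetD_map (f : pvRow → pvRow) (l : List pvRow) (i : Nat) (hi : i < l.length) :
    (l.map f).getD i PySem.Dict.empty = f (l.getD i PySem.Dict.empty) := by
  rw [List.getD_eq_getElem?_getD, List.getD_eq_getElem?_getD, List.getElem?_map,
    List.getElem?_eq_getElem hi]
  rfl

theorem pvGetD_oob (l : List pvRow) (i : Nat) (hi : ¬ i < l.length) :
    l.getD i PySem.Dict.empty = PySem.Dict.empty := by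
  rw [List.getD_eq_getElem?_getD, List.getElem?_eq_none (by omega)]
  rfl

theorem pvExtGetD (a b : List pvRow) (hl : a.length = b.length)
    (h : ∀ j, a.getD j PySem.Dict.empty = b.getD j PySem.Dict.empty) : a = b := by
  apply List.ext_getElem?
  intro i
  by_cases hi : i < a.length
  · rw [List.getElem?_eq_getElem hi, List.getElem?_eq_getElem (by omega : i < b.length)]
    have := h i
    rw [List.getD_eq_getElem?_getD, List.getD_eq_getElem?_getD,
      List.getElem?_eq_getElem hi, List.getElem?_eq_getElem (by omega : i < b.length)] at this
    simpa using this
  · rw [List.getElem?_eq_none (by omega), List.getElem?_eq_none (by omega)]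

-- ---- the inner per-group index loop ----

theorem pvStepA_length (out : List pvRow) (i : Nat) : (pvStepA out i).length = out.length := by
  dsimp only [pvStepA]
  split_ifs <;> simp [List.length_modify]

theorem pvStepA_getD (out : List pvRow) (i j : Nat) (hi : i < out.length) :
    (pvStepA out i).getD j PySem.Dict.empty
    = if j = i then pvTouch (out.getD i PySem.Dict.empty) else out.getD j PySem.Dict.empty := by
  have hmod : ∀ (f : pvRow → pvRow),
      (out.modify i f).getD j PySem.Dict.empty
      = if j = i then f (out.getD i PySem.Dict.empty) else out.getD j PySem.Dict.empty := by
    intro f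
    rw [List.getD_eq_getElem?_getD, List.getElem?_modify]
    by_cases hj : j = i
    · subst hj
      rw [List.getElem?_eq_getElem hi]
      simp [List.getD_eq_getElem?_getD, List.getElem?_eq_getElem hi]
    · simp only [List.getD_eq_getElem?_getD]
      cases h : out[j]? <;> simp [if_neg (fun (h' : i = j) => hj h'.symm), if_neg hj]
  dsimp only [pvStepA, pvTouch]
  set pat := (out.getD i PySem.Dict.empty).getD "token_pattern" "" with hpat
  by_cases h1 : pat == "AAB"
  · simp only [h1, if_true, hmod]
  · by_cases h2 : pat == "ABB"
    · simp only [h1, h2, Bool.false_eq_true, if_false, if_true, hmod]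
    · simp only [h1, h2, Bool.false_eq_true, if_false]
      by_cases hj : j = i
      · subst hj
        simp
      · rw [if_neg hj]

theorem pvInner (ds : List pvRow) (I : List Nat) : ∀ (out : List pvRow),
    out.length = ds.length → I.Nodup →
    (∀ i ∈ I, i < ds.length ∧ out.getD i PySem.Dict.empty = ds.getD i PySem.Dict.empty) →
    (I.foldl pvStepA out).length = out.length ∧
    ∀ j, (I.foldl pvStepA out).getD j PySem.Dict.empty
          = if j ∈ I then pvTouch (ds.getD j PySem.Dict.empty) else out.getD j PySem.Dict.empty := by
  induction I with
  | nil => intro out hlen _ _; simp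
  | cons i I ih =>
    intro out hlen hnd hmem
    simp only [List.foldl_cons]
    obtain ⟨hi, hD⟩ := hmem i (List.mem_cons_self ..)
    have hi' : i < out.length := by omega
    have hstepD : ∀ j, (pvStepA out i).getD j PySem.Dict.empty
        = if j = i then pvTouch (out.getD i PySem.Dict.empty) else out.getD j PySem.Dict.empty :=
      fun j => pvStepA_getD out i j hi'
    have hlen1 : (pvStepA out i).length = out.length := pvStepA_length out i
    have hnd' : I.Nodup := (List.nodup_cons.1 hnd).2
    have hni : i ∉ I := (List.nodup_cons.1 hnd).1
    have hmem' : ∀ i' ∈ I, i' < ds.length ∧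
        (pvStepA out i).getD i' PySem.Dict.empty = ds.getD i' PySem.Dict.empty := by
      intro i' hi'mem
      obtain ⟨ha, hb⟩ := hmem i' (List.mem_cons_of_mem _ hi'mem)
      refine ⟨ha, ?_⟩
      rw [hstepD i', if_neg (fun (h : i' = i) => hni (h ▸ hi'mem))]
      exact hb
    obtain ⟨ihlen, ihD⟩ := ih (pvStepA out i) (by omega) hnd' hmem'
    refine ⟨by omega, fun j => ?_⟩
    rw [ihD j]
    by_cases hjI : j ∈ I
    · simp [hjI, List.mem_cons]
    · rw [if_neg hjI, hstepD j]
      by_cases hji : j = i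
      · subst hji
        rw [if_pos rfl, if_pos (List.mem_cons_self ..), hD]
      · rw [if_neg hji, if_neg (by simp [hji, hjI])]

theorem pvAnyCongrMem {α : Type} (l : List α) (p q : α → Bool) (h : ∀ a ∈ l, p a = q a) :
    l.any p = l.any q := by
  induction l with
  | nil => rfl
  | cons a l ih =>
    simp only [List.any_cons, h a (List.mem_cons_self ..),
      ih (fun b hb => h b (List.mem_cons_of_mem _ hb))]

-- ---- one group step, then the whole fold over the groups ----

theorem pvG_congr_out (ds : List pvRow) (S : List pvKeyT) (K : pvKeyT)
    (hq : pvQual ds K = false) :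
    ds.map (pvG ds S) = ds.map (pvG ds (S ++ [K])) := by
  apply List.map_congr_left
  intro d _
  unfold pvG
  by_cases hk : pvKey d = K
  · rw [hk, hq]
    simp
  · simp [List.mem_append, hk]

theorem pvGroupStep_eq (ds : List pvRow) (S : List pvKeyT) (K : pvKeyT) (hK : K ∉ S) :
    pvGroupStep (ds.map (pvG ds S)) (K, pvIdxs ds K) = ds.map (pvG ds (S ++ [K])) := by
  have hf1 : ∀ i ∈ pvIdxs ds K, i < ds.length ∧
      (ds.map (pvG ds S)).getD i PySem.Dict.empty = ds.getD i PySem.Dict.empty := by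
    intro i hi
    obtain ⟨hlt, hP⟩ := (pvIdxs_mem ds K i).1 hi
    obtain ⟨hgu, hke⟩ := Bool.and_eq_true_iff.1 hP
    have hkey : pvKey (ds.getD i PySem.Dict.empty) = K := by simpa using hke
    refine ⟨hlt, ?_⟩
    rw [pvGetD_map _ _ _ hlt]
    unfold pvG
    rw [if_neg (by rw [hkey, decide_eq_false hK]; simp)]
  dsimp only [pvGroupStep]
  by_cases hlen : (pvIdxs ds K).length < 2
  · rw [if_pos hlen]
    have h2 : ¬ (2 ≤ (pvGrp ds K).length) := by rw [← pvIdxs_length]; omega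
    exact pvG_congr_out ds S K (by simp [pvQual, h2])
  · rw [if_neg hlen]
    have hany : ((pvIdxs ds K).any
        (fun i => ((ds.map (pvG ds S)).getD i PySem.Dict.empty).get? "token_pattern" == some "AB"))
        = (pvGrp ds K).any (fun d => d.get? "token_pattern" == some "AB") := by
      rw [← pvIdxs_any]
      apply pvAnyCongrMem
      intro i hi
      rw [(hf1 i hi).2]
    by_cases hab : (pvGrp ds K).any (fun d => d.get? "token_pattern" == some "AB")
    case neg =>
      have hab' : ((pvGrp ds K).any (fun d => d.get? "token_pattern" == some "AB")) = false := by
        revert hab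
        cases (pvGrp ds K).any (fun d => d.get? "token_pattern" == some "AB") <;> simp
      rw [if_pos (by rw [hany, hab']; rfl)]
      exact pvG_congr_out ds S K (by unfold pvQual; rw [hab']; simp)
    · rw [if_neg (by rw [hany, hab]; simp)]
      have hq : pvQual ds K = true := by
        simp [pvQual, hab]
        rw [← pvIdxs_length]; omega
      obtain ⟨hL, hD⟩ := pvInner ds (pvIdxs ds K) (ds.map (pvG ds S))
        (by simp) (pvIdxs_nodup ds K) hf1
      apply pvExtGetD
      · simp at hL ⊢
        omega
      · intro j
        rw [hD j]
        by_cases hj : j < ds.length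
        · rw [pvGetD_map _ _ _ hj, pvGetD_map _ _ _ hj]
          by_cases hjI : j ∈ pvIdxs ds K
          · rw [if_pos hjI]
            obtain ⟨-, hP⟩ := (pvIdxs_mem ds K j).1 hjI
            obtain ⟨hgu, hke⟩ := Bool.and_eq_true_iff.1 hP
            have hkey : pvKey (ds.getD j PySem.Dict.empty) = K := by simpa using hke
            unfold pvG
            rw [if_pos (by
              rw [hgu, hkey, hq, decide_eq_true (show K ∈ S ++ [K] by simp)]
              rfl)]
          · rw [if_neg hjI]
            have hnP : ¬ ((pvGuard (ds.getD j PySem.Dict.empty)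
                && (pvKey (ds.getD j PySem.Dict.empty) == K)) = true) := by
              intro h
              exact hjI ((pvIdxs_mem ds K j).2 ⟨hj, h⟩)
            unfold pvG
            by_cases hgu : pvGuard (ds.getD j PySem.Dict.empty)
            · have hke : pvKey (ds.getD j PySem.Dict.empty) ≠ K := by
                intro h
                exact hnP (Bool.and_eq_true_iff.2 ⟨hgu, beq_iff_eq.mpr h⟩)
              have hmm : (pvKey (ds.getD j PySem.Dict.empty) ∈ S ++ [K])
                  = (pvKey (ds.getD j PySem.Dict.empty) ∈ S) := by
                apply propext
                constructor
                · intro hx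
                  rcases List.mem_append.1 hx with hx | hx
                  · exact hx
                  · exact absurd (List.mem_singleton.1 hx) hke
                · intro hx
                  exact List.mem_append.2 (Or.inl hx)
              simp only [hmm]
            · have hgu' : pvGuard (ds.getD j PySem.Dict.empty) = false := by
                revert hgu
                cases pvGuard (ds.getD j PySem.Dict.empty) <;> simp
              rw [if_neg (by rw [hgu']; simp), if_neg (by rw [hgu']; simp)]
        · have hjI : j ∉ pvIdxs ds K := fun h => hj ((pvIdxs_mem ds K j).1 h).1
          rw [if_neg hjI, pvGetD_oob _ _ (by simpa using hj), pvGetD_oob _ _ (by simpa using hj)]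

theorem pvFoldGroups (ds : List pvRow) (KS : List pvKeyT) : ∀ (S : List pvKeyT),
    KS.Nodup → (∀ K ∈ KS, K ∉ S) →
    (KS.map (fun K => (K, pvIdxs ds K))).foldl pvGroupStep (ds.map (pvG ds S))
    = ds.map (pvG ds (S ++ KS)) := by
  induction KS with
  | nil =>
    intro S _ _
    simp
  | cons K KS ih =>
    intro S hnd hdisj
    simp only [List.map_cons, List.foldl_cons]
    rw [pvGroupStep_eq ds S K (hdisj K (List.mem_cons_self ..))]
    have hdisj' : ∀ K' ∈ KS, K' ∉ S ++ [K] := by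
      intro K' hK'
      simp only [List.mem_append, List.mem_singleton]
      rintro (h | h)
      · exact hdisj K' (List.mem_cons_of_mem _ hK') h
      · exact (List.nodup_cons.1 hnd).1 (h ▸ hK')
    rw [ih (S ++ [K]) (List.nodup_cons.1 hnd).2 hdisj']
    rw [List.append_assoc]
    rfl

-- ===== VERDICT (by name: the statement is the Claim_ definition above) =====
theorem resolve_companion_duplicate_pairs_spec : Claim_equal_resolve_companion_duplicate_pairs := by
  intro rows _
  unfold Spec_resolve_companion_duplicate_pairs
  show ((pvGroups (rows.map PySem.Dict.ofList)).items.foldl pvGroupStep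
      (rows.map PySem.Dict.ofList)).map (·.items)
    = (((rows.map PySem.Dict.ofList)).map (fun d =>
        if pvGuard d then
          let p := ((rows.map PySem.Dict.ofList).foldl pvStatStep PySem.Dict.empty).getD (pvKey d) (0, false)
          if decide (2 ≤ p.1) && p.2 then pvTouch d else d
        else d)).map (·.items)
  set ds := rows.map PySem.Dict.ofList with hds
  congr 1
  have hitems : (pvGroups ds).items = ((pvGroups ds).keys).map (fun K => (K, pvIdxs ds K)) := by
    rw [PySem.Dict.items_eq_map_keys _ (pvGroups_keys_nodup ds) []]
    exact List.map_congr_left (fun K _ => by rw [pvGroups_getD])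
  have hstart : ds.map (pvG ds []) = ds := by
    have h : ∀ d ∈ ds, pvG ds [] d = id d := by
      intro d _
      simp [pvG]
    rw [List.map_congr_left h, List.map_id]
  have hchain : (pvGroups ds).items.foldl pvGroupStep ds
      = ds.map (pvG ds ([] ++ (pvGroups ds).keys)) := by
    have heq := pvFoldGroups ds (pvGroups ds).keys [] (pvGroups_keys_nodup ds) (by simp)
    rw [hstart] at heq
    rw [hitems]
    exact heq
  rw [hchain]
  apply List.map_congr_left
  intro d hd
  by_cases hg : pvGuard d
  · have hmem := pvGroups_keys_mem ds d hd hg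
    have hstats := pvStats_getD ds PySem.Dict.empty (pvKey d)
    rw [PySem.Dict.getD_empty] at hstats
    simp only [Nat.zero_add, Bool.false_or] at hstats
    unfold pvG
    simp only [hstats, List.nil_append]
    have hrfl : (decide (2 ≤ (pvGrp ds (pvKey d)).length)
        && (pvGrp ds (pvKey d)).any (fun d => PySem.Dict.get? d "token_pattern" == some "AB"))
        = pvQual ds (pvKey d) := rfl
    by_cases hq : pvQual ds (pvKey d) = true
    · rw [if_pos (by simp [hg, hmem, hq]), if_pos hg, if_pos (by rw [hrfl]; exact hq)]
    · have hq' : pvQual ds (pvKey d) = false := by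
        revert hq
        cases pvQual ds (pvKey d) <;> simp
      rw [if_neg (by rw [hq']; simp), if_pos hg, if_neg (by rw [hrfl, hq']; simp)]
  · unfold pvG
    simp [hg]
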